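-- pv_equiv track=rewrite | github.com/JRA2002/python_problems | arrays/leetcode/diff_sum.py | difference_sum
-- ===== SOURCE A (Python) =====
-- def difference_sum(nums):
--         sumaE = sum(nums)
--         sumaD = 0
--         for num in nums:
--             if num > 9:
--                 while num != 0:
--                     res = num % 10
--                     sumaD += res
--                     num = num // 10
--             else:
--                 sumaD += num
--         result = abs(sumaE - sumaD)
--         return result
-- ===== SOURCE B (Python) =====
-- def difference_sum(nums):
--     # digit sum via the decimal string of each number (char traversal, not modulo peeling)
--     digits = sum(num if num <= 9 else sum(ord(d) - 48 for d in str(num)) for num in nums)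
--     return abs(sum(nums) - digits)
-- ===== Notes on version B (the rewrite author's own statement) =====
-- stated objective: simpler
-- what changed: Digit sums are read off each number's decimal string (ord(d)-48 per character) inside a single map/sum expression, replacing A's arithmetic %/// peeling loop with a mutable accumulator.
import Mathlib
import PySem

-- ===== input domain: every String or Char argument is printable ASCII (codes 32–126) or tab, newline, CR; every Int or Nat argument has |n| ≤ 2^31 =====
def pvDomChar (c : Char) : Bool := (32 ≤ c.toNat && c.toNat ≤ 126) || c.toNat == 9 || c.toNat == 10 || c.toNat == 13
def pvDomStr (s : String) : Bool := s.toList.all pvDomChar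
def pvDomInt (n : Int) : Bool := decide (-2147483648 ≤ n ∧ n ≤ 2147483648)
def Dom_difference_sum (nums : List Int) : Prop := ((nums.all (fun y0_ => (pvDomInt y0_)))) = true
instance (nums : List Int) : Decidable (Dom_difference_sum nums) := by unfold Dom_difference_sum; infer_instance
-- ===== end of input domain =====

-- B reads each number's digit sum off its decimal string instead of A's %/// peeling loop (objective: simpler).

-- ===== PORT A =====
-- A's inner `while num != 0` is only entered with num > 9, so num stays positive;
-- the `0 < num` guard is the totality guard for that loop (same values on every reached state).
def digitLoopA (num acc : Int) : Int :=
  if 0 < num then digitLoopA (PySem.Int.floordiv num 10) (acc + PySem.Int.mod num 10) else acc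
termination_by num.toNat
decreasing_by
  rename_i h
  rw [PySem.Int.floordiv_eq_ediv_of_pos (by norm_num)]
  omega

def difference_sum (nums : List Int) : Int :=
  let sumaE := nums.sum
  let sumaD := nums.foldl (fun acc num => if num > 9 then digitLoopA num acc else acc + num) 0
  |sumaE - sumaD|

-- ===== PORT B =====
def strDigitSum (num : Int) : Int :=
  (PySem.Int.toChars num).foldl (fun acc d => acc + ((d.toNat : Int) - 48)) 0

def difference_sum_alt (nums : List Int) : Int :=
  let digits := (nums.map (fun num => if num ≤ 9 then num else strDigitSum num)).sum
  |nums.sum - digits|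

-- ===== PRECONDITION & SPEC =====
def Spec_difference_sum (nums : List Int) (out : Int) : Prop := out = difference_sum_alt nums
instance (nums : List Int) (out : Int) : Decidable (Spec_difference_sum nums out) := by unfold Spec_difference_sum; infer_instance

-- ===== CLAIM (what is proved, stated in full; the proofs are below) =====
def Claim_equal_difference_sum : Prop := ∀ (nums : List Int), Dom_difference_sum nums → Spec_difference_sum nums (difference_sum nums)

-- ===== LEMMAS AND PROOFS =====

/-- Digit sum of a natural number, the mathematical reference both sides are compared to. -/
def natDigitSum (n : Nat) : Int :=
  if n = 0 then 0 else natDigitSum (n / 10) + ((n % 10 : Nat) : Int)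

lemma digitLoopA_natCast (m : Nat) : ∀ acc, digitLoopA (m : Int) acc = acc + natDigitSum m := by
  induction m using Nat.strong_induction_on with
  | _ m ih =>
    intro acc
    rw [digitLoopA]
    by_cases h : 0 < m
    · rw [if_pos (by exact_mod_cast h)]
      have h10 : PySem.Int.floordiv ((m : Int)) 10 = ((m / 10 : Nat) : Int) := by
        exact_mod_cast PySem.Int.floordiv_natCast m 10
      have h10' : PySem.Int.mod ((m : Int)) 10 = ((m % 10 : Nat) : Int) := by
        exact_mod_cast PySem.Int.mod_natCast m 10
      rw [h10, h10', ih (m / 10) (Nat.div_lt_self h (by norm_num))]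
      conv_rhs => rw [natDigitSum]
      rw [if_neg (by omega)]
      ring
    · have hm : m = 0 := by omega
      subst hm
      rw [if_neg (by decide), natDigitSum, if_pos rfl]
      ring

/-- char-value sum used by B. -/
def csum (l : List Char) : Int := (l.map (fun d => (d.toNat : Int) - 48)).sum

lemma digitChar_val (m : Nat) (h : m < 10) :
    ((Nat.digitChar m).toNat : Int) - 48 = (m : Int) := by
  interval_cases m <;> decide

lemma csum_toDigitsCore (fuel : Nat) : ∀ (n : Nat) (ds : List Char), n < fuel →
    csum (Nat.toDigitsCore 10 fuel n ds) = natDigitSum n + csum ds := by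
  induction fuel with
  | zero => intro n ds h; omega
  | succ f ih =>
    intro n ds h
    rw [Nat.toDigitsCore]
    by_cases h0 : n / 10 = 0
    · simp only [h0, if_pos]
      have hlt : n % 10 < 10 := Nat.mod_lt _ (by norm_num)
      by_cases hn : n = 0
      · subst hn
        simp [csum, digitChar_val 0 (by norm_num)]
        rw [natDigitSum, if_pos rfl]
      · have hc : csum (Nat.digitChar (n % 10) :: ds) = ((n % 10 : Nat) : Int) + csum ds := by
          simp only [csum, List.map_cons, List.sum_cons]
          rw [digitChar_val _ hlt]
        have hn' : natDigitSum n = ((n % 10 : Nat) : Int) := by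
          conv_lhs => rw [natDigitSum]
          rw [if_neg hn, h0, natDigitSum, if_pos rfl]
          ring
        rw [hc, hn']
    · rw [if_neg h0]
      have hn10 : n ≥ 10 := by
        by_contra hc
        exact h0 (Nat.div_eq_of_lt (by omega))
      have hf : n / 10 < f := by
        have := Nat.div_lt_self (show 0 < n by omega) (show 1 < 10 by norm_num)
        omega
      rw [ih (n / 10) _ hf]
      have hlt : n % 10 < 10 := Nat.mod_lt _ (by norm_num)
      have hc : csum (Nat.digitChar (n % 10) :: ds) = ((n % 10 : Nat) : Int) + csum ds := by
        simp only [csum, List.map_cons, List.sum_cons]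
        rw [digitChar_val _ hlt]
      have hn' : natDigitSum n = natDigitSum (n / 10) + ((n % 10 : Nat) : Int) := by
        conv_lhs => rw [natDigitSum]
        rw [if_neg (by omega)]
      rw [hc, hn']
      ring

lemma strDigitSum_eq (num : Int) (h : 9 < num) : strDigitSum num = natDigitSum num.toNat := by
  rw [strDigitSum, PySem.List.foldl_add]
  rw [PySem.Int.toChars, if_neg (by omega)]
  have : csum (Nat.toDigits 10 num.toNat) = natDigitSum num.toNat + csum [] := by
    exact csum_toDigitsCore (num.toNat + 1) num.toNat [] (by omega)
  simpa [csum] using this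

lemma foldl_sumaD (nums : List Int) : ∀ acc,
    nums.foldl (fun acc num => if num > 9 then digitLoopA num acc else acc + num) acc
      = acc + (nums.map (fun num => if num ≤ 9 then num else strDigitSum num)).sum := by
  induction nums with
  | nil => intro acc; simp
  | cons x xs ih =>
    intro acc
    simp only [List.foldl_cons, List.map_cons, List.sum_cons, ih]
    by_cases h : x > 9
    · rw [if_pos h, if_neg (by omega)]
      have hx : ((x.toNat : Int)) = x := Int.toNat_of_nonneg (by omega)
      have hd := digitLoopA_natCast x.toNat acc
      rw [hx] at hd
      rw [strDigitSum_eq x h, hd]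
      ring
    · rw [if_neg h, if_pos (by omega)]
      ring

-- ===== VERDICT (by name: the statement is the Claim_ definition above) =====
theorem difference_sum_spec : Claim_equal_difference_sum := by
  intro nums _
  unfold Spec_difference_sum difference_sum difference_sum_alt
  rw [foldl_sumaD nums 0]
  ring_nf
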